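-- pv_equiv track=rewrite | github.com/abmantis/aoc2024 | 03b.py | find_mul
-- ===== SOURCE A (Python) =====
-- MUL_STR = "mul("
--
-- def is_mul(input: str) -> bool:
--     return input.startswith(MUL_STR)
--
-- def is_do(input: str) -> bool:
--     return input.startswith("do()")
--
-- def is_dont(input: str) -> bool:
--     return input.startswith("don't()")
--
-- def find_mul(input: str) -> int:
--     skip_mul = False
--     for i in range(len(input)):
--         test = input[i:]
--         if is_dont(test):
--             skip_mul = True
--             continue
--         if is_do(test):
--             skip_mul = False
--             continue
--         if not skip_mul and is_mul(test):
--             return i + len(MUL_STR)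
--     return -1
-- ===== SOURCE B (Python) =====
-- def find_mul(input: str) -> int:
--     # Tokenize into a non-overlapping stream of do()/don't()/mul( tokens,
--     # then run a skip-flag state machine over the token stream.
--     tokens = []
--     i = 0
--     n = len(input)
--     while i < n:
--         if input.startswith("don't()", i):
--             tokens.append(("don't", 0))
--             i += 7
--         elif input.startswith("do()", i):
--             tokens.append(("do", 0))
--             i += 4
--         elif input.startswith("mul(", i):
--             tokens.append(("mul", i + 4))
--             i += 4
--         else:
--             i += 1
--     skip = False
--     for kind, end in tokens:
--         if kind == "don't":
--             skip = True
--         elif kind == "do":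
--             skip = False
--         elif not skip:
--             return end
--     return -1
-- ===== Notes on version B (the rewrite author's own statement) =====
-- stated objective: faster
-- what changed: Replaces A's per-index scan that slices input[i:] and re-tests every suffix with a single tokenize pass (jumping past each matched do()/don't()/mul( token, using startswith with an offset so no slices are copied) followed by a skip-flag fold over the token stream.
import Mathlib
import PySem

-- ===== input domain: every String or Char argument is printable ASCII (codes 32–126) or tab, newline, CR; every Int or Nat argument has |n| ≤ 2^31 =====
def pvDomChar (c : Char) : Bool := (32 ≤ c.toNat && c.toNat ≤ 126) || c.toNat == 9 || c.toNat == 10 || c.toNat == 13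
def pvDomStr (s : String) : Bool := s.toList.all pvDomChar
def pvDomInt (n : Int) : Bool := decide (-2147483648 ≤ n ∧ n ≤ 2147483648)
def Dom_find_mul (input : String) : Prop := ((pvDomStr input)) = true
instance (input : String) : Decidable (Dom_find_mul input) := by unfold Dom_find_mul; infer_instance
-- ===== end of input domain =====

-- B replaces A's per-index suffix re-scan with a single tokenize pass followed by a
-- skip-flag fold over the token stream (alternative decomposition; avoids slicing).

-- ===== PORT A =====
-- is_dont / is_do / is_mul : input.startswith(...)
def isDontL (cs : List Char) : Bool := "don't()".toList.isPrefixOf cs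
def isDoL (cs : List Char) : Bool := "do()".toList.isPrefixOf cs
def isMulL (cs : List Char) : Bool := "mul(".toList.isPrefixOf cs

-- the for-i-in-range loop: test = input[i:] is the current suffix, stepped one char at a time
def findA : List Char → Bool → Int → Int
  | [], _, _ => -1
  | c :: rest, skip, i =>
    if isDontL (c :: rest) then findA rest true (i + 1)
    else if isDoL (c :: rest) then findA rest false (i + 1)
    else if !skip && isMulL (c :: rest) then i + 4
    else findA rest skip (i + 1)

def find_mul (input : String) : Int := findA input.toList false 0

-- ===== PORT B =====
inductive Tok where
  | dont : Tok
  | doo : Tok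
  | mul : Int → Tok
deriving DecidableEq, Repr

-- the while-loop building the token list (jumps past each matched token)
def tokenize (cs : List Char) (i : Int) : List Tok :=
  match cs with
  | [] => []
  | c :: rest =>
    if "don't()".toList.isPrefixOf (c :: rest) then Tok.dont :: tokenize (rest.drop 6) (i + 7)
    else if "do()".toList.isPrefixOf (c :: rest) then Tok.doo :: tokenize (rest.drop 3) (i + 4)
    else if "mul(".toList.isPrefixOf (c :: rest) then Tok.mul (i + 4) :: tokenize (rest.drop 3) (i + 4)
    else tokenize rest (i + 1)
termination_by cs.length
decreasing_by
  all_goals simp [List.length_drop]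

-- the for-loop over the token stream with the skip flag
def scanToks : List Tok → Bool → Int
  | [], _ => -1
  | Tok.dont :: ts, _ => scanToks ts true
  | Tok.doo :: ts, _ => scanToks ts false
  | Tok.mul e :: ts, skip => if !skip then e else scanToks ts skip

def find_mul_alt (input : String) : Int := scanToks (tokenize input.toList 0) false

-- ===== PRECONDITION & SPEC =====
def Spec_find_mul (input : String) (out : Int) : Prop := out = find_mul_alt input
instance (input : String) (out : Int) : Decidable (Spec_find_mul input out) := by unfold Spec_find_mul; infer_instance

-- ===== CLAIM (what is proved, stated in full; the proofs are below) =====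
def Claim_equal_find_mul : Prop := ∀ (input : String), Dom_find_mul input → Spec_find_mul input (find_mul input)

-- ===== LEMMAS AND PROOFS =====

-- stepping A past a character that cannot start any token
lemma findA_cons_nomatch (c : Char) (rest : List Char) (skip : Bool) (i : Int)
    (hd : c ≠ 'd') (hm : c ≠ 'm') :
    findA (c :: rest) skip i = findA rest skip (i + 1) := by
  simp [findA, isDontL, isDoL, isMulL, List.isPrefixOf, Ne.symm hd, Ne.symm hm]

lemma key : ∀ (n : Nat) (cs : List Char), cs.length ≤ n → ∀ (skip : Bool) (i : Int),
    findA cs skip i = scanToks (tokenize cs i) skip := by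
  intro n
  induction n with
  | zero =>
    intro cs h skip i
    have : cs = [] := List.length_eq_zero_iff.mp (Nat.le_zero.mp h)
    subst this; simp [findA, tokenize, scanToks]
  | succ n ih =>
    intro cs h skip i
    cases cs with
    | nil => simp [findA, tokenize, scanToks]
    | cons c rest =>
      by_cases h1 : "don't()".toList.isPrefixOf (c :: rest)
      · obtain ⟨u, hu⟩ := List.isPrefixOf_iff_prefix.mp h1
        have hlist : c :: rest = 'd'::'o'::'n'::'\''::'t'::'('::')'::u := by
          rw [← hu]; rfl
        injection hlist with hc hrest
        subst hc; subst hrest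
        have hlen : u.length ≤ n := by simp at h; omega
        rw [show (tokenize ('d'::'o'::'n'::'\''::'t'::'('::')'::u) i)
              = Tok.dont :: tokenize u (i + 7) from by
            rw [tokenize]; simp [List.isPrefixOf]]
        rw [show findA ('d'::'o'::'n'::'\''::'t'::'('::')'::u) skip i
              = findA ('o'::'n'::'\''::'t'::'('::')'::u) true (i+1) from by
            simp [findA, isDontL, isDoL, isMulL, List.isPrefixOf]]
        rw [findA_cons_nomatch _ _ _ _ (by decide) (by decide),
            findA_cons_nomatch _ _ _ _ (by decide) (by decide),
            findA_cons_nomatch _ _ _ _ (by decide) (by decide),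
            findA_cons_nomatch _ _ _ _ (by decide) (by decide),
            findA_cons_nomatch _ _ _ _ (by decide) (by decide),
            findA_cons_nomatch _ _ _ _ (by decide) (by decide)]
        rw [show (i+1+1+1+1+1+1+1 : Int) = i + 7 from by ring]
        rw [scanToks]
        exact ih u hlen true (i + 7)
      · by_cases h2 : "do()".toList.isPrefixOf (c :: rest)
        · obtain ⟨u, hu⟩ := List.isPrefixOf_iff_prefix.mp h2
          have hlist : c :: rest = 'd'::'o'::'('::')'::u := by
            rw [← hu]; rfl
          injection hlist with hc hrest
          subst hc; subst hrest
          have hlen : u.length ≤ n := by simp at h; omega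
          rw [show (tokenize ('d'::'o'::'('::')'::u) i)
                = Tok.doo :: tokenize u (i + 4) from by
              rw [tokenize]; simp [List.isPrefixOf]]
          rw [show findA ('d'::'o'::'('::')'::u) skip i
                = findA ('o'::'('::')'::u) false (i+1) from by
              simp [findA, isDontL, isDoL, isMulL, List.isPrefixOf]]
          rw [findA_cons_nomatch _ _ _ _ (by decide) (by decide),
              findA_cons_nomatch _ _ _ _ (by decide) (by decide),
              findA_cons_nomatch _ _ _ _ (by decide) (by decide)]
          rw [show (i+1+1+1+1 : Int) = i + 4 from by ring]
          rw [scanToks]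
          exact ih u hlen false (i + 4)
        · by_cases h3 : "mul(".toList.isPrefixOf (c :: rest)
          · obtain ⟨u, hu⟩ := List.isPrefixOf_iff_prefix.mp h3
            have hlist : c :: rest = 'm'::'u'::'l'::'('::u := by
              rw [← hu]; rfl
            injection hlist with hc hrest
            subst hc; subst hrest
            have hlen : u.length ≤ n := by simp at h; omega
            rw [show (tokenize ('m'::'u'::'l'::'('::u) i)
                  = Tok.mul (i + 4) :: tokenize u (i + 4) from by
                rw [tokenize]; simp [List.isPrefixOf]]
            cases skip with
            | false =>
              rw [show findA ('m'::'u'::'l'::'('::u) false i = i + 4 from by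
                  simp [findA, isDontL, isDoL, isMulL, List.isPrefixOf]]
              rw [scanToks]; simp
            | true =>
              rw [show findA ('m'::'u'::'l'::'('::u) true i
                    = findA ('u'::'l'::'('::u) true (i+1) from by
                  simp [findA, isDontL, isDoL, isMulL, List.isPrefixOf]]
              rw [findA_cons_nomatch _ _ _ _ (by decide) (by decide),
                  findA_cons_nomatch _ _ _ _ (by decide) (by decide),
                  findA_cons_nomatch _ _ _ _ (by decide) (by decide)]
              rw [show (i+1+1+1+1 : Int) = i + 4 from by ring]
              rw [scanToks]; simp
              exact ih u hlen true (i + 4)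
          · have hlen : rest.length ≤ n := by simp at h; omega
            rw [show (tokenize (c::rest) i) = tokenize rest (i + 1) from by
                rw [tokenize]; simp only [h1, h2, h3]; simp]
            rw [show findA (c::rest) skip i = findA rest skip (i+1) from by
                rw [findA]; simp only [isDontL, isDoL, isMulL, h1, h2, h3]; simp]
            exact ih rest hlen skip (i + 1)

-- ===== VERDICT (by name: the statement is the Claim_ definition above) =====
theorem find_mul_spec : Claim_equal_find_mul := by
  intro input _
  unfold Spec_find_mul find_mul find_mul_alt
  exact key input.toList.length input.toList le_rfl false 0
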